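-- pv_equiv track=rewrite | github.com/ABcd9876543210/abcPLN | pract_7_b.py | FA
-- ===== SOURCE A (Python) =====
-- def FA(s):
--     if len(s)<3:
--         return "rejected"
--     if s[0] =="1":
--         if s[1]=="0":
--             if s[0]=="1":
--                 for i in range(3,len(s)):
--                     if s[i]!="1":
--                         return "rejected"
--                 return "accepted"
--             return "rejected"
--         return "rejected"
--     return "rejected"
-- ===== SOURCE B (Python) =====
-- import re
--
-- _PAT = re.compile(r"10(?s:.)1*")
--
-- def FA(s):
--     return "accepted" if _PAT.fullmatch(s) else "rejected"
-- ===== Notes on version B (the rewrite author's own statement) =====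
-- stated objective: idiomatic
-- what changed: Replaced the nested if-chain plus index loop by a single compiled regex fullmatch of a fixed pattern: literal '10', then one arbitrary DOTALL character (A never checks s[2]), then only '1's to the end.
import Mathlib
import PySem

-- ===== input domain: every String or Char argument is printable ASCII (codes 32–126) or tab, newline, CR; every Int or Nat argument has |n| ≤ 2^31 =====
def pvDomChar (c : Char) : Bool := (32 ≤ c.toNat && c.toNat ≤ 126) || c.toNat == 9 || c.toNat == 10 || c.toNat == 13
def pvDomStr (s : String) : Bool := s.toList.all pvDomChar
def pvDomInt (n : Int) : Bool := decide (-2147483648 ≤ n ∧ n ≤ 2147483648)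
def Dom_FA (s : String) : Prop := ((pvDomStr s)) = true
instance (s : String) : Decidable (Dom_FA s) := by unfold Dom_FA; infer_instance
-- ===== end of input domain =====

-- B replaces A's nested if-chain plus index loop by one regex fullmatch (r"10(?s:.)1*"); objective: idiomatic.


-- ===== PORT A =====
-- the 'for i in range(3, len(s))' loop with early return "rejected"
def FA_go (l : List Char) (i : Nat) : String :=
  if h : i < l.length then
    if l[i] ≠ '1' then "rejected" else FA_go l (i + 1)
  else "accepted"
termination_by l.length - i

def FA (s : String) : String :=
  let l := s.toList
  if l.length < 3 then "rejected"
  else if PySem.List.pyGet? l 0 = some '1' then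
    if PySem.List.pyGet? l 1 = some '0' then
      if PySem.List.pyGet? l 0 = some '1' then
        FA_go l 3
      else "rejected"
    else "rejected"
  else "rejected"

-- ===== PORT B =====
-- hand-written matcher for the fixed regex fullmatch r"10(?s:.)1*" (exact: '1','0', any one char, then only '1's to the end)
def FA_alt (s : String) : String :=
  match s.toList with
  | '1' :: '0' :: _ :: rest => if rest.all (· = '1') then "accepted" else "rejected"
  | _ => "rejected"

-- ===== PRECONDITION & SPEC =====
def Spec_FA (s : String) (out : String) : Prop := out = FA_alt s
instance (s : String) (out : String) : Decidable (Spec_FA s out) := by unfold Spec_FA; infer_instance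

-- ===== CLAIM (what is proved, stated in full; the proofs are below) =====
def Claim_equal_FA : Prop := ∀ (s : String), Dom_FA s → Spec_FA s (FA s)

-- ===== LEMMAS AND PROOFS =====
theorem FA_go_eq (l : List Char) (i : Nat) :
    FA_go l i = if (l.drop i).all (· = '1') then "accepted" else "rejected" := by
  induction i using FA_go.induct (l := l) with
  | case1 i h hne =>
    rw [FA_go, dif_pos h, if_pos hne, List.drop_eq_getElem_cons h, List.all_cons]
    simp only [ne_eq] at *
    simp [hne]
  | case2 i h hne ih =>
    rw [FA_go, dif_pos h, if_neg hne, ih, List.drop_eq_getElem_cons h, List.all_cons]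
    simp only [ne_eq, not_not] at hne
    simp [hne]
  | case3 i h =>
    rw [FA_go, dif_neg h, List.drop_eq_nil_of_le (by omega)]
    simp

-- ===== VERDICT (by name: the statement is the Claim_ definition above) =====
theorem FA_spec : Claim_equal_FA := by
  intro s _
  unfold Spec_FA FA FA_alt
  match h : s.toList with
  | [] => simp
  | [a] => simp
  | [a, b] => simp
  | a :: b :: c :: rest =>
    simp only [List.length_cons, PySem.List.pyGet?_zero_cons]
    have h1 : PySem.List.pyGet? (a :: b :: c :: rest) 1 = some b := by
      rw [show (1:Int) = ((1:Nat):Int) from rfl, PySem.List.pyGet?_natCast]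
      simp
    rw [h1, FA_go_eq]
    have h3 : (a :: b :: c :: rest).drop 3 = rest := rfl
    rw [h3]
    by_cases ha : a = '1' <;> by_cases hb : b = '0' <;> simp [ha, hb]
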